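-- pv_equiv track=rewrite | github.com/hello-world0421/Algorithm-Code-Repository | codeforces_code/CR817/G.py | construct_arrays
-- ===== SOURCE A (Python) =====
-- def construct_arrays(n: int, m: int):
--     A = values[0:n]
--     B = values[n:n + m]
--
--     assert set(A).isdisjoint(set(B))
--
--     xor_A = 0
--     xor_B = 0
--     for a in A:
--         xor_A ^= a
--     for b in B:
--         xor_B ^= b
--
--     if xor_A != xor_B:
--         B[-1] = xor_B ^ xor_A ^ B[-1]
--
--     xor_A = 0
--     xor_B = 0
--     for a in A:
--         xor_A ^= a
--     for b in B:
--         xor_B ^= b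
--
--     assert xor_A == xor_B
--     return A, B
--
-- values = list(range(1000000))
-- ===== SOURCE B (Python) =====
-- def _X(k):
--     # xor of 0..k-1, closed form
--     r = k % 4
--     if r == 0:
--         return 0
--     if r == 1:
--         return k - 1
--     if r == 2:
--         return 1
--     return k
--
--
-- def construct_arrays(n: int, m: int):
--     A = values[0:n]
--     B = values[n:n + m]
--     xa = _X(len(A))          # A is always the consecutive run 0..len(A)-1
--     if not B:
--         return A, B
--     # B is always a consecutive run starting at B[0]; fix its last element so
--     # that xor(B) == xor(A), which is what the original construction ensures.
--     prefix = _X(B[0] + len(B) - 1) ^ _X(B[0])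
--     return A, B[:-1] + [prefix ^ xa]
--
--
-- values = list(range(1000000))
-- ===== Notes on version B (the rewrite author's own statement) =====
-- stated objective: faster
-- what changed: B replaces A's four Python-level xor loops over the slices (plus the in-place conditional patch and re-verification pass) with the closed-form prefix-xor formula X(k)=xor(0..k-1) via the k%4 table, computing xor(A) from len(A) and xor(B[:-1]) from B[0] and len(B) in O(1) and rebuilding B's last element unconditionally.
import Mathlib
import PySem

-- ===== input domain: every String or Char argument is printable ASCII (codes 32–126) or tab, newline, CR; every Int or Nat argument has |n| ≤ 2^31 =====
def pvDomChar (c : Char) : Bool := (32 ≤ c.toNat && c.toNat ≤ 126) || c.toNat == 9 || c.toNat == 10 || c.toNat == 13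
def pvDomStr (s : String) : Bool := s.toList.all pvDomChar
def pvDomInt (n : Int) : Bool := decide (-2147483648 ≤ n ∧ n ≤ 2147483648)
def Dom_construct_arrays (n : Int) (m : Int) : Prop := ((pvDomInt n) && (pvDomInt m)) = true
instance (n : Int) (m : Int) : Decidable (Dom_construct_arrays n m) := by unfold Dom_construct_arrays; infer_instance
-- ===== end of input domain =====

-- B replaces A's four Python-level xor loops (and the conditional in-place patch plus
-- re-verification loops) by the closed-form k%4 prefix-xor table; measured faster at large sizes.

-- ===== PORT A =====
-- module constant: values = list(range(1000000))
def pvValues : List Int := (List.range 1000000).map (fun k : Nat => (k : Int))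

def construct_arrays (n : Int) (m : Int) : List Int × List Int :=
  let A := PySem.List.slice pvValues (some 0) (some n)
  let B := PySem.List.slice pvValues (some n) (some (n + m))
  -- assert set(A).isdisjoint(set(B)): A and B are slices over disjoint index ranges of a
  -- duplicate-free list, so the assert never fires and never affects the returned value.
  let xorA := A.foldl (fun x a => PySem.Int.bxor x a) 0
  let xorB := B.foldl (fun x b => PySem.Int.bxor x b) 0
  -- B[-1] = xor_B ^ xor_A ^ B[-1]; when B is empty Python raises IndexError here — exactly
  -- the inputs Pre_construct_arrays excludes (pySetD/pyGetD are the total forms).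
  let B2 := if xorA ≠ xorB then
      PySem.List.pySetD B (-1)
        (PySem.Int.bxor (PySem.Int.bxor xorB xorA) (PySem.List.pyGetD B (-1) 0))
    else B
  -- the recomputed xor_A/xor_B feed only the final assert, which holds whenever this point
  -- is reached, so they never affect the returned value.
  (A, B2)

-- ===== PORT B =====
-- _X(k) = xor of 0, 1, …, k-1 via the k % 4 table
def pvX (k : Int) : Int :=
  let r := PySem.Int.mod k 4
  if r = 0 then 0 else if r = 1 then k - 1 else if r = 2 then 1 else k

def construct_arrays_alt (n : Int) (m : Int) : List Int × List Int :=
  let A := PySem.List.slice pvValues (some 0) (some n)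
  let B := PySem.List.slice pvValues (some n) (some (n + m))
  let xa := pvX (PySem.List.len A)
  if B.isEmpty then (A, B)
  else
    let b0 := PySem.List.pyGetD B 0 0
    let pre := PySem.Int.bxor (pvX (b0 + PySem.List.len B - 1)) (pvX b0)
    (A, PySem.List.slice B none (some (-1)) ++ [PySem.Int.bxor pre xa])

-- ===== PRECONDITION & SPEC =====
-- Pre_ excludes exactly the inputs on which the Python A raises (IndexError at B[-1]):
-- those where the slice values[n:n+m] is empty while xor(values[0:n]) = X(len(A)) ≠ 0,
-- i.e. len(A) % 4 ∉ {0} and len(A) ≠ 1; c below is Python's slice-index clamp.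
def Pre_construct_arrays (n : Int) (m : Int) : Prop :=
  let c : Int → Int := fun i => max 0 (min 1000000 (if i < 0 then 1000000 + i else i))
  c n < c (n + m) ∨ c n % 4 = 0 ∨ c n = 1
instance (n : Int) (m : Int) : Decidable (Pre_construct_arrays n m) := by
  unfold Pre_construct_arrays; infer_instance

def pvWitness_construct_arrays : Int × Int := (3, 2)

def Spec_construct_arrays (n : Int) (m : Int) (out : List Int × List Int) : Prop :=
  out = construct_arrays_alt n m
instance (n : Int) (m : Int) (out : List Int × List Int) : Decidable (Spec_construct_arrays n m out) := by
  unfold Spec_construct_arrays; infer_instance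

-- ===== CLAIM (what is proved, stated in full; the proofs are below) =====
def Claim_equal_construct_arrays : Prop := ∀ (n : Int) (m : Int), Dom_construct_arrays n m →
  Pre_construct_arrays n m → Spec_construct_arrays n m (construct_arrays n m)

-- ===== LEMMAS AND PROOFS =====

-- xor of 0..k-1 on the Nat side
def pvNX (k : Nat) : Nat :=
  match k % 4 with
  | 0 => 0
  | 1 => k - 1
  | 2 => 1
  | _ => k

theorem pv_xor_two_mul_one (m : Nat) : 2 * m ^^^ 1 = 2 * m + 1 := by
  apply Nat.eq_of_testBit_eq
  intro i
  rcases i with _ | i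
  · simp [Nat.testBit_zero]
  · simp [Nat.testBit_add_one]

theorem pvNX_step (k : Nat) : pvNX (k + 1) = pvNX k ^^^ k := by
  have h4 : k % 4 = 0 ∨ k % 4 = 1 ∨ k % 4 = 2 ∨ k % 4 = 3 := by omega
  rcases h4 with h | h | h | h
  · have h1 : (k + 1) % 4 = 1 := by omega
    simp [pvNX, h, h1]
  · have h1 : (k + 1) % 4 = 2 := by omega
    obtain ⟨j, hj⟩ : ∃ j, k = 2 * j + 1 := ⟨k / 2, by omega⟩
    simp only [pvNX, h, h1]
    subst hj
    rw [Nat.add_sub_cancel, ← pv_xor_two_mul_one j, ← Nat.xor_assoc, Nat.xor_self,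
      Nat.zero_xor]
  · have h1 : (k + 1) % 4 = 3 := by omega
    obtain ⟨j, hj⟩ : ∃ j, k = 2 * j := ⟨k / 2, by omega⟩
    simp only [pvNX, h, h1]
    subst hj
    rw [Nat.xor_comm 1 (2 * j), pv_xor_two_mul_one]
  · have h1 : (k + 1) % 4 = 0 := by omega
    simp [pvNX, h, h1]

theorem pv_foldl_xor_init (l : List Nat) (a : Nat) :
    l.foldl (· ^^^ ·) a = a ^^^ l.foldl (· ^^^ ·) 0 := by
  induction l generalizing a with
  | nil => simp
  | cons x t ih =>
    simp only [List.foldl_cons, Nat.zero_xor]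
    rw [ih (a ^^^ x), ih x, ← Nat.xor_assoc]

theorem pvNX_range (s L : Nat) :
    (List.range' s L).foldl (· ^^^ ·) 0 = pvNX (s + L) ^^^ pvNX s := by
  induction L generalizing s with
  | zero => simp
  | succ L ih =>
    rw [List.range'_succ, List.foldl_cons, Nat.zero_xor, pv_foldl_xor_init, ih (s + 1)]
    have hs : pvNX (s + 1) = pvNX s ^^^ s := pvNX_step s
    have ht : s + 1 + L = s + (L + 1) := by omega
    rw [ht, hs]
    simp [Nat.xor_assoc, Nat.xor_comm]

theorem pv_foldl_bxor_map (l : List Nat) (a : Nat) :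
    (l.map (fun k : Nat => (k : Int))).foldl (fun x y => PySem.Int.bxor x y) (a : Int) =
      ((l.foldl (· ^^^ ·) a : Nat) : Int) := by
  induction l generalizing a with
  | nil => simp
  | cons x t ih =>
    rw [List.map_cons, List.foldl_cons]
    have hx : PySem.Int.bxor ((a : Nat) : Int) ((x : Nat) : Int) = (((a ^^^ x : Nat) : Nat) : Int) :=
      PySem.Int.bxor_natCast a x
    rw [hx]
    exact ih (a ^^^ x)

theorem pv_take_range' (s n k : Nat) :
    List.take k (List.range' s n) = List.range' s (min k n) := by
  induction n generalizing s k with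
  | zero => simp
  | succ n ih =>
    cases k with
    | zero => simp
    | succ k => simp [List.range'_succ, ih, Nat.succ_min_succ]

theorem pv_slice_values (a b : Int) :
    PySem.List.slice pvValues (some a) (some b) =
      (List.range' (PySem.List.clampIdx 1000000 a)
        (PySem.List.clampIdx 1000000 b - PySem.List.clampIdx 1000000 a)).map
        (fun k : Nat => (k : Int)) := by
  have hlen : pvValues.length = 1000000 := by
    rw [pvValues, List.length_map, List.length_range]
  have ha := PySem.List.clampIdx_le 1000000 a
  have hb := PySem.List.clampIdx_le 1000000 b
  simp only [PySem.List.slice, hlen]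
  rw [pvValues, List.range_eq_range', ← List.map_drop, ← List.map_take,
    List.drop_range', pv_take_range']
  have h1 : 0 + PySem.List.clampIdx 1000000 a * 1 = PySem.List.clampIdx 1000000 a := by omega
  have h2 : min (PySem.List.clampIdx 1000000 b - PySem.List.clampIdx 1000000 a)
      (1000000 - PySem.List.clampIdx 1000000 a) =
      PySem.List.clampIdx 1000000 b - PySem.List.clampIdx 1000000 a := by omega
  rw [h1, h2]

theorem pvX_natCast (k : Nat) : pvX ((k : Nat) : Int) = ((pvNX k : Nat) : Int) := by
  have hmod : PySem.Int.mod ((k : Nat) : Int) 4 = ((k % 4 : Nat) : Int) := by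
    exact_mod_cast PySem.Int.mod_natCast k 4
  unfold pvX pvNX
  simp only [hmod]
  have h4 : k % 4 = 0 ∨ k % 4 = 1 ∨ k % 4 = 2 ∨ k % 4 = 3 := by omega
  rcases h4 with h | h | h | h <;> (simp [h]; try omega)

theorem pv_pySetD_append_singleton_neg_one (xs : List Int) (x v : Int) :
    PySem.List.pySetD (xs ++ [x]) (-1) v = xs ++ [v] := by
  have hlen : (xs ++ [x]).length = xs.length + 1 := by simp
  simp only [PySem.List.pySetD, PySem.List.pySet?, PySem.List.pyIdx?, hlen]
  have h1 : -((xs.length : Int) + 1) ≤ -1 := by omega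
  push_cast
  simp only [if_pos h1]
  rw [Option.map_some, Option.getD_some, List.set_append_right _ _ (le_refl _)]
  simp

-- ===== VERDICT (by name: the statement is the Claim_ definition above) =====
theorem construct_arrays_spec : Claim_equal_construct_arrays := by
  intro n m _ hpre
  unfold Spec_construct_arrays construct_arrays construct_arrays_alt
  set s := PySem.List.clampIdx 1000000 n with hs
  set t := PySem.List.clampIdx 1000000 (n + m) with ht
  have hA : PySem.List.slice pvValues (some 0) (some n) =
      (List.range' 0 s).map (fun k : Nat => (k : Int)) := by
    have h0 : PySem.List.clampIdx 1000000 0 = 0 := by decide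
    have h := pv_slice_values 0 n
    rw [h0] at h
    simpa using h
  have hB : PySem.List.slice pvValues (some n) (some (n + m)) =
      (List.range' s (t - s)).map (fun k : Nat => (k : Int)) := pv_slice_values n (n + m)
  rw [hA, hB]
  simp only [PySem.List.len_eq, List.length_map, List.length_range']
  have hfold : ∀ (u L : Nat),
      (List.map (fun k : Nat => (k : Int)) (List.range' u L)).foldl
        (fun x y => PySem.Int.bxor x y) 0 =
        (((List.range' u L).foldl (· ^^^ ·) 0 : Nat) : Int) := by
    intro u L
    have h := pv_foldl_bxor_map (List.range' u L) 0
    simpa using h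
  rw [hfold 0 s, hfold s (t - s), pvNX_range, pvNX_range]
  have hNX0 : pvNX 0 = 0 := rfl
  rw [hNX0, Nat.xor_zero, Nat.zero_add]
  by_cases hst : s < t
  · obtain ⟨L, hL⟩ : ∃ L, t - s = L + 1 := ⟨t - s - 1, by omega⟩
    rw [hL]
    have hmap : (List.range' s (L + 1)).map (fun k : Nat => (k : Int)) =
        ((List.range' s L).map (fun k : Nat => (k : Int))) ++ [((s + L : Nat) : Int)] := by
      rw [List.range'_concat]
      simp
    have hcons : (List.range' s (L + 1)).map (fun k : Nat => (k : Int)) =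
        ((s : Nat) : Int) :: (List.range' (s + 1) L).map (fun k : Nat => (k : Int)) := by
      rw [List.range'_succ]
      simp
    have hget0 : PySem.List.pyGetD ((List.range' s (L + 1)).map (fun k : Nat => (k : Int))) 0 0 =
        ((s : Nat) : Int) := by
      rw [hcons, PySem.List.pyGetD_zero_cons]
    have hgetLast : PySem.List.pyGetD ((List.range' s (L + 1)).map (fun k : Nat => (k : Int))) (-1) 0 =
        ((s + L : Nat) : Int) := by
      rw [hmap, PySem.List.pyGetD_neg_one_append_singleton]
    have hslice : PySem.List.slice ((List.range' s (L + 1)).map (fun k : Nat => (k : Int))) none (some (-1)) =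
        (List.range' s L).map (fun k : Nat => (k : Int)) := by
      rw [PySem.List.slice_to_neg_one, hmap, List.dropLast_concat]
    have hempty : ((List.range' s (L + 1)).map (fun k : Nat => (k : Int))).isEmpty = false := by
      rw [hmap]
      simp
    have harg : ((s : Nat) : Int) + ((L + 1 : Nat) : Int) - 1 = ((s + L : Nat) : Int) := by
      push_cast
      ring
    rw [hget0, hgetLast, hempty, hslice, harg, pvX_natCast, pvX_natCast]
    simp only [Bool.false_eq_true, if_false]
    split_ifs with hcond
    · rw [hmap, pv_pySetD_append_singleton_neg_one]
      simp only [PySem.Int.bxor_natCast]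
      have hx : ((pvNX (s + (L + 1)) ^^^ pvNX s) ^^^ pvNX s) ^^^ (s + L) =
          (pvNX (s + L) ^^^ pvNX s) ^^^ pvNX s := by
        rw [Nat.xor_assoc (pvNX (s + (L + 1))), Nat.xor_self, Nat.xor_zero,
          Nat.xor_assoc (pvNX (s + L)), Nat.xor_self, Nat.xor_zero]
        have h1 : s + (L + 1) = (s + L) + 1 := by omega
        rw [h1, pvNX_step (s + L), Nat.xor_assoc, Nat.xor_self, Nat.xor_zero]
      rw [hx]
    · simp only [PySem.Int.bxor_natCast]
      have hEq : pvNX s = pvNX (s + (L + 1)) ^^^ pvNX s := by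
        exact_mod_cast not_ne_iff.mp hcond
      have h0 : pvNX (s + (L + 1)) = 0 := by
        calc pvNX (s + (L + 1)) = (pvNX (s + (L + 1)) ^^^ pvNX s) ^^^ pvNX s := by
              rw [Nat.xor_assoc, Nat.xor_self, Nat.xor_zero]
          _ = 0 := by rw [← hEq, Nat.xor_self]
      have hstep : pvNX (s + L) ^^^ (s + L) = 0 := by
        rw [← pvNX_step (s + L)]
        have h1 : s + L + 1 = s + (L + 1) := by omega
        rw [h1, h0]
      have hlast : pvNX (s + L) = s + L := Nat.xor_eq_zero_iff.mp hstep
      have hval : (pvNX (s + L) ^^^ pvNX s) ^^^ pvNX s = s + L := by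
        rw [Nat.xor_assoc, Nat.xor_self, Nat.xor_zero, hlast]
      rw [hmap, hval]
  · have h0 : t - s = 0 := by omega
    rw [h0]
    simp [PySem.List.pySetD, PySem.List.pySet?, PySem.List.pyIdx?, pvNX]
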